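-- pv_equiv track=rewrite | github.com/Asi0Flammeus/course-ally | course_components/chapter_generator.py | _clean_transcript_content
-- ===== SOURCE A (Python) =====
-- def _clean_transcript_content(content: str) -> str:
--     """Remove metadata header from transcript content."""
--     lines = content.split('\n')
--
--     # Find the end of metadata section (usually marked by === line)
--     content_start = 0
--     for i, line in enumerate(lines):
--         if '=' * 10 in line:  # Look for separator line
--             content_start = i + 1
--             break
--
--     # Join remaining lines
--     return '\n'.join(lines[content_start:]).strip()
-- ===== SOURCE B (Python) =====
-- def _clean_transcript_content(content: str) -> str:
--     """Remove metadata header from transcript content."""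
--     idx = content.find('==========')
--     if idx == -1:
--         return content.strip()
--     nl = content.find('\n', idx)
--     if nl == -1:
--         return ''
--     return content[nl + 1:].strip()
-- ===== Notes on version B (the rewrite author's own statement) =====
-- stated objective: simpler
-- what changed: B drops the split-into-lines list, the enumerate loop and the join: it finds the separator substring directly with str.find, then finds the next newline and slices the remainder, so no list of lines is ever built.
import Mathlib
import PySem

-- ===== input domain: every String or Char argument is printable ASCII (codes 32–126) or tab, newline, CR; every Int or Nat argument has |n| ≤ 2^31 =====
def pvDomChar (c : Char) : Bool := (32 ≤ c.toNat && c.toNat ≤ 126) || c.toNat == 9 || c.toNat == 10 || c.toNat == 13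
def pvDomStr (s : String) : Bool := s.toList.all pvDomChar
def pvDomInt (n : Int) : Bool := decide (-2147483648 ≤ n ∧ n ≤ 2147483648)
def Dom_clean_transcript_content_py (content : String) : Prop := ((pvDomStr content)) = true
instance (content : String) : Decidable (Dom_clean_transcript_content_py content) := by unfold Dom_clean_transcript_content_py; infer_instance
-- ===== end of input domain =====

-- B replaces A's split-into-lines / enumerate-loop / join with two direct substring searches (find the
-- separator, then the next newline) and one slice — simpler: no line list is built. (Objective: simpler.)

-- ===== PORT A =====
-- the 'for i, line in enumerate(lines): if '='*10 in line: content_start = i+1; break' loop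
def pvLoopA : List (Int × String) → Int → Int
  | [], acc => acc
  | (i, line) :: rest, acc =>
      if PySem.Str.isIn "==========" line then i + 1 else pvLoopA rest acc

def clean_transcript_content_py (content : String) : String :=
  let lines := (PySem.Str.split? content "\n").getD []   -- sep "\n" ≠ "", so split? is always `some`
  let contentStart := pvLoopA (PySem.List.enumerate lines 0) 0
  PySem.Str.strip (PySem.Str.join "\n" (PySem.List.slice lines (some contentStart) none))

-- ===== PORT B =====
def clean_transcript_content_py_alt (content : String) : String :=
  let idx := PySem.Str.find content "=========="
  if idx = -1 then
    PySem.Str.strip content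
  else
    let nl := PySem.Str.findFrom content "\n" idx
    if nl = -1 then ""
    else PySem.Str.strip (PySem.Str.slice content (some (nl + 1)) none)

-- ===== PRECONDITION & SPEC =====
def Spec_clean_transcript_content_py (content : String) (out : String) : Prop := out = clean_transcript_content_py_alt content
instance (content : String) (out : String) : Decidable (Spec_clean_transcript_content_py content out) := by unfold Spec_clean_transcript_content_py; infer_instance

-- ===== CLAIM (what is proved, stated in full; the proofs are below) =====
def Claim_equal_clean_transcript_content_py : Prop := ∀ (content : String), Dom_clean_transcript_content_py content → Spec_clean_transcript_content_py content (clean_transcript_content_py content)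

-- ===== LEMMAS AND PROOFS =====

/-- The separator substring `'=' * 10` as a list of characters. -/
def pvSep : List Char := ['=', '=', '=', '=', '=', '=', '=', '=', '=', '=']

lemma pvSep_eq : "==========".toList = pvSep := by decide

lemma pvSep_length : pvSep.length = 10 := by decide

/-- Char-level form of A's result. -/
def pvAchar (cs : List Char) : List Char :=
  match (cs.splitOn '\n').findIdx? (fun l => PySem.Chars.isIn pvSep l) with
  | some j => PySem.Chars.strip (PySem.Chars.join ['\n'] ((cs.splitOn '\n').drop (j + 1)))
  | none => PySem.Chars.strip cs

/-- Char-level form of B's result. -/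
def pvBchar (cs : List Char) : List Char :=
  let idx := PySem.Chars.find cs pvSep
  if idx = -1 then PySem.Chars.strip cs
  else
    let nl := PySem.Chars.findFrom cs ['\n'] idx
    if nl = -1 then []
    else PySem.Chars.strip (PySem.Chars.slice cs (some (nl + 1)) none)

-- ---- bridge: PySem's splitOn on a single-char separator is Mathlib's List.splitOn ----

lemma pv_go_spec (c : Char) : ∀ (fuel : Nat) (l cur : List Char) (acc : List (List Char)), l.length < fuel →
    PySem.Chars.splitOn.go [c] fuel l cur acc
      = acc.reverse ++ (l.splitOn c).modifyHead (cur.reverse ++ ·) := by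
  intro fuel
  induction fuel with
  | zero => intro l cur acc h; omega
  | succ fuel ih =>
    intro l cur acc h
    cases l with
    | nil =>
      simp [PySem.Chars.splitOn.go, List.splitOn]
    | cons x rest =>
      rw [PySem.Chars.splitOn.go]
      by_cases hx : x = c
      · subst hx
        have hpre : List.isPrefixOf [x] (x :: rest) = true := by
          simp [List.isPrefixOf]
        rw [if_pos hpre]
        simp only [List.length_cons] at h
        rw [ih _ _ _ (by simpa using Nat.lt_of_succ_lt_succ h)]
        obtain ⟨hd, tl, hsp⟩ : ∃ hd tl, rest.splitOn x = hd :: tl := by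
          rcases hsp : rest.splitOn x with _ | ⟨hd, tl⟩
          · exact absurd hsp (List.splitOnP_ne_nil _ _)
          · exact ⟨hd, tl, rfl⟩
        simp [List.splitOn, List.splitOnP_cons] at *
        simp [hsp]
      · have hpre : List.isPrefixOf [c] (x :: rest) = false := by
          simp [List.isPrefixOf]
          exact fun hc => absurd hc.symm hx
        rw [if_neg (by simp [hpre])]
        simp only [List.length_cons] at h
        rw [ih _ _ _ (by omega)]
        obtain ⟨hd, tl, hsp⟩ : ∃ hd tl, rest.splitOn c = hd :: tl := by
          rcases hsp : rest.splitOn c with _ | ⟨hd, tl⟩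
          · exact absurd hsp (List.splitOnP_ne_nil _ _)
          · exact ⟨hd, tl, rfl⟩
        simp only [List.splitOn, List.splitOnP_cons] at *
        rw [hsp]
        simp [beq_iff_eq, hx]

lemma pv_splitOn_eq (cs : List Char) (c : Char) :
    PySem.Chars.splitOn cs [c] = cs.splitOn c := by
  rw [PySem.Chars.splitOn, pv_go_spec c (cs.length+1) cs [] [] (by omega)]
  obtain ⟨hd, tl, hsp⟩ : ∃ hd tl, cs.splitOn c = hd :: tl := by
    rcases hsp : cs.splitOn c with _ | ⟨hd, tl⟩
    · exact absurd hsp (List.splitOnP_ne_nil _ _)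
    · exact ⟨hd, tl, rfl⟩
  simp [hsp]

lemma pv_splitOn_no_nl (cs : List Char) (h : '\n' ∉ cs) : cs.splitOn '\n' = [cs] := by
  refine List.splitOnP_eq_single _ _ (fun x hx => ?_)
  simp only [beq_iff_eq]
  rintro rfl; exact h hx

lemma pv_splitOn_cons (l0 t : List Char) (h : '\n' ∉ l0) :
    (l0 ++ '\n' :: t).splitOn '\n' = l0 :: t.splitOn '\n' := by
  have h2 := List.splitOnP_append_cons (fun x => x == '\n') l0 t '\n' (by simp)
  have h1 := pv_splitOn_no_nl l0 h
  simp only [List.splitOn] at h1 ⊢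
  rw [h2, h1, List.singleton_append]

lemma pv_mem_intersperse {α : Type} (sep l : List α) (L : List (List α)) (h : l ∈ L) :
    l ∈ L.intersperse sep := by
  induction L with
  | nil => simp at h
  | cons a L ih =>
    cases L with
    | nil => simpa using h
    | cons b L =>
      rw [List.intersperse_cons₂]
      rcases List.mem_cons.mp h with h | h
      · subst h; simp
      · simp only [List.mem_cons]; right; right; exact ih (by simpa using h)

lemma pv_mem_splitOn_infix (cs l : List Char) (h : l ∈ cs.splitOn '\n') : l <:+: cs := by
  have h2 : l <:+: ['\n'].intercalate (cs.splitOn '\n') :=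
    List.infix_of_mem_flatten (pv_mem_intersperse _ _ _ h)
  rwa [List.intercalate_splitOn] at h2

-- ---- occurrence classification across a newline ----

lemma pv_drop_append_le (l0 rest : List Char) (i : Nat) (hi : i ≤ l0.length) :
    (l0 ++ rest).drop i = l0.drop i ++ rest := by
  rw [List.drop_append_of_le_length hi]

lemma pv_drop_shift (l0 t : List Char) (m : Nat) :
    (l0 ++ '\n' :: t).drop (l0.length + 1 + m) = t.drop m := by
  rw [List.drop_append, List.drop_eq_nil_of_le (by omega), List.nil_append]
  have h2 : l0.length + 1 + m - l0.length = m + 1 := by omega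
  rw [h2, List.drop_succ_cons]

lemma pv_occ (l0 t : List Char) (i : Nat)
    (h : pvSep <+: (l0 ++ '\n' :: t).drop i) :
    (i + 10 ≤ l0.length ∧ pvSep <+: l0.drop i) ∨
    (l0.length + 1 ≤ i ∧ pvSep <+: t.drop (i - l0.length - 1)) := by
  by_cases hi : i ≤ l0.length
  · left
    rw [pv_drop_append_le _ _ _ hi] at h
    have hlen : (l0.drop i).length = l0.length - i := List.length_drop ..
    by_cases hl : 10 ≤ (l0.drop i).length
    · have htake := List.prefix_iff_eq_take.mp h
      rw [List.take_append_of_le_length (by rw [pvSep_length]; exact hl)] at htake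
      refine ⟨by omega, ?_⟩
      rw [htake]
      exact List.take_prefix _ _
    · exfalso
      have hbd : (l0.drop i).length < pvSep.length := by rw [pvSep_length]; omega
      have hg := h.getElem (i := (l0.drop i).length) hbd
      rw [List.getElem_append_right (le_refl _)] at hg
      simp only [Nat.sub_self, List.getElem_cons_zero] at hg
      have hmem : '\n' ∈ pvSep := hg ▸ List.getElem_mem _
      simp [pvSep] at hmem
  · right
    refine ⟨by omega, ?_⟩
    have hd : (l0 ++ '\n' :: t).drop i = t.drop (i - l0.length - 1) := by
      have h1 : i = l0.length + 1 + (i - l0.length - 1) := by omega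
      rw [h1, pv_drop_shift]
      congr 1
      omega
    rwa [hd] at h

lemma pv_prefix_drop_infix (s sub : List Char) (i : Nat) (h : sub <+: s.drop i) : sub <:+: s := by
  rw [← PySem.Chars.isIn_iff_infix]
  exact (PySem.Chars.exists_prefix_drop_iff_isIn sub s).mp ⟨i, h⟩

lemma pv_infix_exists (s sub : List Char) (h : sub <:+: s) :
    ∃ i, i + sub.length ≤ s.length ∧ sub <+: s.drop i := by
  have h3 := PySem.Chars.exists_prefix_drop_iff_isIn (s := s) (sub := sub)
  rw [PySem.Chars.isIn_iff_infix] at h3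
  obtain ⟨i, hi⟩ := h3.mpr h
  refine ⟨min i s.length, ?_, ?_⟩
  · have hle := hi.length_le
    simp at hle ⊢
    omega
  · rcases Nat.le_total i s.length with hc | hc
    · rwa [Nat.min_eq_left hc]
    · rw [Nat.min_eq_right hc]
      rw [List.drop_eq_nil_of_le hc] at hi
      rw [List.drop_eq_nil_of_le (le_refl _)]
      exact hi

lemma pv_infix_iff (l0 t : List Char) :
    pvSep <:+: (l0 ++ '\n' :: t) ↔ pvSep <:+: l0 ∨ pvSep <:+: t := by
  constructor
  · intro h
    obtain ⟨i, _, hp⟩ := pv_infix_exists _ _ h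
    rcases pv_occ l0 t i hp with ⟨_, hp'⟩ | ⟨_, hp'⟩
    · exact Or.inl (pv_prefix_drop_infix _ _ _ hp')
    · exact Or.inr (pv_prefix_drop_infix _ _ _ hp')
  · rintro (h | h)
    · exact h.trans (List.infix_append_left ..)
    · exact h.trans ((List.suffix_cons '\n' t).trans (List.suffix_append l0 _)).isInfix

lemma pv_decomp (cs : List Char) (h : '\n' ∈ cs) :
    ∃ l0 t, cs = l0 ++ '\n' :: t ∧ '\n' ∉ l0 := by
  refine ⟨cs.takeWhile (· ≠ '\n'), (cs.dropWhile (· ≠ '\n')).tail, ?_, ?_⟩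
  · have hne : cs.dropWhile (· ≠ '\n') ≠ [] := by
      intro hnil
      have h4 := List.takeWhile_append_dropWhile (p := fun c => c ≠ '\n') (l := cs)
      rw [hnil, List.append_nil] at h4
      rw [← h4] at h
      have h5 := List.mem_takeWhile_imp h
      simp at h5
    obtain ⟨x, xs, hx⟩ := List.exists_cons_of_ne_nil hne
    have hx' : x = '\n' := by
      have h5 := List.head_dropWhile_not (p := fun c => c ≠ '\n') (l := cs) hne
      simp only [decide_eq_false_iff_not, not_not] at h5
      have h8 := List.head?_eq_head (l := cs.dropWhile (· ≠ '\n')) hne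
      rw [h5, hx] at h8
      simp at h8
      exact h8
    conv_lhs => rw [← List.takeWhile_append_dropWhile (p := fun c => c ≠ '\n') (l := cs)]
    rw [hx, hx']
    simp
  · intro hmem
    have h5 := List.mem_takeWhile_imp hmem
    simp at h5

lemma pv_line_witness : ∀ (n : Nat) (cs : List Char), cs.length ≤ n → pvSep <:+: cs →
    ∃ l ∈ cs.splitOn '\n', pvSep <:+: l := by
  intro n
  induction n with
  | zero =>
    intro cs hn h
    have hcs : cs = [] := List.length_eq_zero_iff.mp (by omega)
    subst hcs
    exact ⟨[], by simp [pv_splitOn_no_nl [] (by simp)], by simpa using h⟩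
  | succ n ih =>
    intro cs hn h
    by_cases hnl : '\n' ∈ cs
    · obtain ⟨l0, t, rfl, hl0⟩ := pv_decomp cs hnl
      rw [pv_splitOn_cons l0 t hl0]
      rcases (pv_infix_iff l0 t).mp h with h' | h'
      · exact ⟨l0, by simp, h'⟩
      · have hlen : t.length ≤ n := by
          rw [List.length_append, List.length_cons] at hn
          omega
        obtain ⟨l, hmem, hl⟩ := ih t hlen h'
        exact ⟨l, by simp [hmem], hl⟩
    · exact ⟨cs, by simp [pv_splitOn_no_nl cs hnl], h⟩

lemma pv_find_eq (s sub : List Char) (p : Nat)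
    (h1 : sub <+: s.drop p) (h2 : ∀ i < p, ¬ sub <+: s.drop i) :
    PySem.Chars.find s sub = (p : Int) := by
  have hin : sub <:+: s := pv_prefix_drop_infix _ _ _ h1
  have hnn : 0 ≤ PySem.Chars.find s sub := (PySem.Chars.find_nonneg_iff _ _).mpr hin
  obtain ⟨hp, hmin⟩ := PySem.Chars.find_spec (s := s) (sub := sub) hnn
  have hq : (PySem.Chars.find s sub).toNat = p := by
    by_contra hne
    rcases Nat.lt_or_ge (PySem.Chars.find s sub).toNat p with hc | hc
    · exact h2 _ hc hp
    · exact hmin p (by omega) h1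
  omega

lemma pv_find_single (u t : List Char) (c : Char) (h : c ∉ u) :
    PySem.Chars.find (u ++ c :: t) [c] = (u.length : Int) := by
  refine pv_find_eq _ _ u.length ?_ ?_
  · rw [List.drop_append_of_le_length (le_refl _), List.drop_eq_nil_of_le (le_refl _), List.nil_append]
    simp
  · intro i hi hpre
    have hd : (u ++ c :: t).drop i = u.drop i ++ c :: t := by
      rw [List.drop_append_of_le_length (by omega)]
    rw [hd] at hpre
    obtain ⟨r, hr⟩ := hpre
    have hne : u.drop i ≠ [] := by
      intro hnil
      have hlen : (u.drop i).length = 0 := by rw [hnil]; rfl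
      simp at hlen
      omega
    obtain ⟨x, xs, hx⟩ := List.exists_cons_of_ne_nil hne
    rw [hx] at hr
    simp at hr
    have hxc : x = c := hr.1.symm
    have hxm : x ∈ u := by
      have hxd : x ∈ u.drop i := by rw [hx]; simp
      exact List.mem_of_mem_drop hxd
    exact h (hxc ▸ hxm)

-- ---- A's enumerate loop computes findIdx? ----

lemma pv_loop_none (ls : List String) (k acc : Int)
    (h : ls.findIdx? (fun s => PySem.Str.isIn "==========" s) = none) :
    pvLoopA (PySem.List.enumerate ls k) acc = acc := by
  induction ls generalizing k with
  | nil => simp [PySem.List.enumerate_nil, pvLoopA]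
  | cons x xs ih =>
    rw [List.findIdx?_cons] at h
    cases hx : PySem.Str.isIn "==========" x with
    | true => rw [hx] at h; simp at h
    | false =>
      rw [hx] at h
      simp only [Bool.false_eq_true, if_false, Option.map_eq_none_iff] at h
      rw [PySem.List.enumerate_cons, pvLoopA]
      rw [hx]
      simp only [Bool.false_eq_true, if_false]
      exact ih _ h

lemma pv_loop_some (ls : List String) (k acc : Int) (j : Nat)
    (h : ls.findIdx? (fun s => PySem.Str.isIn "==========" s) = some j) :
    pvLoopA (PySem.List.enumerate ls k) acc = k + j + 1 := by
  induction ls generalizing k j with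
  | nil => simp at h
  | cons x xs ih =>
    rw [List.findIdx?_cons] at h
    cases hx : PySem.Str.isIn "==========" x with
    | true =>
      rw [hx] at h
      simp at h
      rw [PySem.List.enumerate_cons, pvLoopA, hx]
      simp
      omega
    | false =>
      rw [hx] at h
      simp only [Bool.false_eq_true, if_false] at h
      rcases Option.map_eq_some_iff.mp h with ⟨j', hj', rfl⟩
      rw [PySem.List.enumerate_cons, pvLoopA, hx]
      simp only [Bool.false_eq_true, if_false]
      rw [ih _ _ hj']
      push_cast
      ring

-- ---- the two ports reduce to their char-level forms ----

lemma pv_nl_toList : "\n".toList = ['\n'] := by decide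

lemma pv_findIdx?_map (ll : List (List Char)) :
    (ll.map String.ofList).findIdx? (fun s => PySem.Str.isIn "==========" s)
      = ll.findIdx? (fun l => PySem.Chars.isIn pvSep l) := by
  rw [List.findIdx?_map]
  congr 1
  funext l
  simp [Function.comp, PySem.Str.isIn, String.toList_ofList, pvSep_eq]

lemma pv_join_strip (ll : List (List Char)) :
    PySem.Str.strip (PySem.Str.join "\n" (ll.map String.ofList))
      = String.ofList (PySem.Chars.strip (PySem.Chars.join ['\n'] ll)) := by
  rw [PySem.Str.join, pv_nl_toList, PySem.Str.strip, List.map_map]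
  have hco : (String.toList ∘ String.ofList) = fun l : List Char => l := by
    funext l
    exact String.toList_ofList
  rw [hco, List.map_id', String.toList_ofList]

set_option maxHeartbeats 1000000 in
lemma pv_a_eq (content : String) :
    clean_transcript_content_py content = String.ofList (pvAchar content.toList) := by
  have hsplit : PySem.Str.split? content "\n"
      = some ((content.toList.splitOn '\n').map String.ofList) := by
    rw [PySem.Str.split?, pv_nl_toList, PySem.Chars.split?]
    simp [pv_splitOn_eq]
  rw [clean_transcript_content_py]
  simp only [hsplit, Option.getD_some]
  rw [pvAchar]
  cases h : (content.toList.splitOn '\n').findIdx? (fun l => PySem.Chars.isIn pvSep l) with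
  | none =>
    rw [pv_loop_none _ 0 0 (by rw [pv_findIdx?_map]; exact h)]
    rw [show ((0 : Int) = ((0 : Nat) : Int)) from rfl, PySem.List.slice_from _ (by omega)]
    simp only [Int.toNat_natCast, List.drop_zero]
    rw [pv_join_strip, PySem.Chars.join, List.intercalate_splitOn]
  | some j =>
    rw [pv_loop_some _ 0 0 j (by rw [pv_findIdx?_map]; exact h)]
    have hcast : (0 : Int) + (j : Int) + 1 = ((j + 1 : Nat) : Int) := by push_cast; ring
    rw [hcast, PySem.List.slice_from _ (by omega)]
    simp only [Int.toNat_natCast]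
    rw [← List.map_drop, pv_join_strip]

lemma pv_b_eq (content : String) :
    clean_transcript_content_py_alt content = String.ofList (pvBchar content.toList) := by
  simp only [clean_transcript_content_py_alt, pvBchar, PySem.Str.find, PySem.Str.findFrom,
    PySem.Str.strip, PySem.Str.slice, pvSep_eq, pv_nl_toList, String.toList_ofList]
  split_ifs <;> rfl

-- ---- the main char-level equivalence ----

lemma pv_strip_nil : PySem.Chars.strip [] = [] := by decide

lemma pv_isIn_true (l : List Char) (h : pvSep <:+: l) : PySem.Chars.isIn pvSep l = true := by
  rw [PySem.Chars.isIn_iff_infix]; exact h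

lemma pv_len_cs (l0 t : List Char) : (l0 ++ '\n' :: t).length = l0.length + t.length + 1 := by
  rw [List.length_append, List.length_cons]
  omega

set_option maxHeartbeats 1000000 in
lemma pv_main : ∀ (n : Nat) (cs : List Char), cs.length ≤ n → pvAchar cs = pvBchar cs := by
  intro n
  induction n with
  | zero =>
    intro cs hn
    have hcs : cs = [] := List.length_eq_zero_iff.mp (by omega)
    subst hcs
    decide
  | succ n ih =>
    intro cs hn
    by_cases hsep : pvSep <:+: cs
    · by_cases hnl : '\n' ∈ cs
      · obtain ⟨l0, t, rfl, hl0⟩ := pv_decomp cs hnl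
        by_cases hsl0 : pvSep <:+: l0
        · -- separator inside the first line: both return strip t
          rw [pvAchar, pv_splitOn_cons l0 t hl0, List.findIdx?_cons,
              if_pos (pv_isIn_true l0 hsl0)]
          simp only [List.drop_succ_cons, List.drop_zero]
          rw [PySem.Chars.join, List.intercalate_splitOn]
          -- B side
          obtain ⟨j, hj, hjp⟩ := pv_infix_exists l0 pvSep hsl0
          rw [pvSep_length] at hj
          have hjcs : pvSep <+: (l0 ++ '\n' :: t).drop j := by
            rw [pv_drop_append_le _ _ _ (by omega)]
            exact hjp.trans (List.prefix_append _ _)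
          have hnn : 0 ≤ PySem.Chars.find (l0 ++ '\n' :: t) pvSep :=
            (PySem.Chars.find_nonneg_iff _ _).mpr hsep
          obtain ⟨hp, hmin⟩ := PySem.Chars.find_spec (s := l0 ++ '\n' :: t) (sub := pvSep) hnn
          obtain ⟨k, hkdef⟩ : ∃ k : Nat, PySem.Chars.find (l0 ++ '\n' :: t) pvSep = (k : Int) :=
            ⟨_, (Int.toNat_of_nonneg hnn).symm⟩
          rw [hkdef] at hp hmin
          simp only [Int.toNat_natCast] at hp hmin
          have hkj : k ≤ j := by
            by_contra hgt
            exact hmin j (by omega) hjcs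
          have hk10 : k + 10 ≤ l0.length := by omega
          have hnotin : '\n' ∉ l0.drop k := fun hm => hl0 (List.mem_of_mem_drop hm)
          rw [pvBchar, hkdef]
          rw [if_neg (show ¬((k : Nat) : Int) = -1 by omega)]
          rw [PySem.Chars.findFrom_natCast _ _ k (by rw [pv_len_cs]; omega)]
          rw [pv_drop_append_le _ _ _ (by omega), pv_find_single _ _ _ hnotin]
          rw [if_neg (show ¬(((l0.drop k).length : Nat) : Int) = -1 by omega)]
          rw [if_neg (show ¬((k : Int) + ((l0.drop k).length : Int)) = -1 by
            have h8 : (l0.drop k).length = l0.length - k := List.length_drop ..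
            omega)]
          have hnl' : (k : Int) + ((l0.drop k).length : Int) + 1 = ((l0.length + 1 : Nat) : Int) := by
            have h8 : (l0.drop k).length = l0.length - k := List.length_drop ..
            rw [h8]
            push_cast [Nat.cast_sub (show k ≤ l0.length by omega)]
            ring
          rw [PySem.Chars.slice_eq_listSlice, hnl', PySem.List.slice_from _ (by omega)]
          rw [Int.toNat_natCast]
          have hdrop : (l0 ++ '\n' :: t).drop (l0.length + 1) = t := by
            have h9 : l0.length + 1 = l0.length + 1 + 0 := by omega
            rw [h9, pv_drop_shift, List.drop_zero]
          rw [hdrop]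
        · -- separator not in the first line: reduce to the tail t
          have hst : pvSep <:+: t := by
            rcases (pv_infix_iff l0 t).mp hsep with h' | h'
            · exact absurd h' hsl0
            · exact h'
          have hlen : t.length ≤ n := by
            rw [pv_len_cs] at hn; omega
          -- A side: pvAchar (l0 ++ '\n' :: t) = pvAchar t
          obtain ⟨l, hmem, hl⟩ := pv_line_witness t.length t le_rfl hst
          obtain ⟨j, hj⟩ : ∃ j, (t.splitOn '\n').findIdx? (fun l => PySem.Chars.isIn pvSep l) = some j := by
            cases hc : (t.splitOn '\n').findIdx? (fun l => PySem.Chars.isIn pvSep l) with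
            | none =>
              rw [List.findIdx?_eq_none_iff] at hc
              have h7 := hc l hmem
              rw [pv_isIn_true l hl] at h7
              simp at h7
            | some j => exact ⟨j, rfl⟩
          have hA : pvAchar (l0 ++ '\n' :: t) = pvAchar t := by
            rw [pvAchar, pvAchar, pv_splitOn_cons l0 t hl0, List.findIdx?_cons,
                if_neg (by rw [Bool.not_eq_true, PySem.Chars.isIn_eq_false_iff]; exact hsl0), hj]
            simp only [Option.map_some]
            rw [List.drop_succ_cons]
          -- B side: pvBchar (l0 ++ '\n' :: t) = pvBchar t
          have hnnt : 0 ≤ PySem.Chars.find t pvSep :=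
            (PySem.Chars.find_nonneg_iff _ _).mpr hst
          obtain ⟨hpt, hmint⟩ := PySem.Chars.find_spec (s := t) (sub := pvSep) hnnt
          obtain ⟨kt, hktdef⟩ : ∃ kt : Nat, PySem.Chars.find t pvSep = (kt : Int) :=
            ⟨_, (Int.toNat_of_nonneg hnnt).symm⟩
          rw [hktdef] at hpt hmint
          simp only [Int.toNat_natCast] at hpt hmint
          have hktle : kt ≤ t.length := by
            have h6 := PySem.Chars.find_le_length t pvSep
            rw [hktdef] at h6
            omega
          have hfcs : PySem.Chars.find (l0 ++ '\n' :: t) pvSep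
              = ((l0.length + 1 + kt : Nat) : Int) := by
            apply pv_find_eq
            · rw [pv_drop_shift]; exact hpt
            · intro i hi hpre
              rcases pv_occ l0 t i hpre with ⟨_, hp'⟩ | ⟨hge, hp'⟩
              · exact hsl0 (pv_prefix_drop_infix _ _ _ hp')
              · exact hmint (i - l0.length - 1) (by omega) hp'
          have hB : pvBchar (l0 ++ '\n' :: t) = pvBchar t := by
            rw [pvBchar, pvBchar, hfcs, hktdef]
            rw [if_neg (show ¬((l0.length + 1 + kt : Nat) : Int) = -1 by omega)]
            rw [if_neg (show ¬((kt : Nat) : Int) = -1 by omega)]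
            rw [PySem.Chars.findFrom_natCast _ _ (l0.length + 1 + kt) (by rw [pv_len_cs]; omega)]
            rw [PySem.Chars.findFrom_natCast _ _ kt hktle]
            rw [pv_drop_shift]
            by_cases hq : PySem.Chars.find (t.drop kt) ['\n'] = -1
            · rw [if_pos hq, if_pos hq]
              simp
            · rw [if_neg hq, if_neg hq]
              have hq0 : 0 ≤ PySem.Chars.find (t.drop kt) ['\n'] := by
                have h6 := PySem.Chars.neg_one_le_find (t.drop kt) ['\n']
                omega
              obtain ⟨q, hqdef⟩ : ∃ q : Nat, PySem.Chars.find (t.drop kt) ['\n'] = (q : Int) :=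
                ⟨_, (Int.toNat_of_nonneg hq0).symm⟩
              rw [hqdef]
              rw [if_neg (show ¬((l0.length + 1 + kt : Nat) : Int) + (q : Int) = -1 by omega)]
              rw [if_neg (show ¬((kt : Nat) : Int) + (q : Int) = -1 by omega)]
              congr 1
              rw [PySem.Chars.slice_eq_listSlice, PySem.Chars.slice_eq_listSlice]
              rw [PySem.List.slice_from _ (by omega), PySem.List.slice_from _ (by omega)]
              have hc1 : (((l0.length + 1 + kt : Nat) : Int) + (q : Int) + 1).toNat
                  = l0.length + 1 + (kt + q + 1) := by omega
              have hc2 : (((kt : Nat) : Int) + (q : Int) + 1).toNat = kt + q + 1 := by omega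
              rw [hc1, hc2, pv_drop_shift]
          rw [hA, hB]
          exact ih t hlen
      · -- separator present, no newline at all: both return []
        have hsplit : cs.splitOn '\n' = [cs] := pv_splitOn_no_nl cs hnl
        rw [pvAchar, hsplit, List.findIdx?_cons, if_pos (pv_isIn_true cs hsep)]
        simp only [List.drop_succ_cons, List.drop_nil]
        rw [show PySem.Chars.join ['\n'] ([] : List (List Char)) = [] from rfl, pv_strip_nil]
        -- B side
        have hnn : 0 ≤ PySem.Chars.find cs pvSep := (PySem.Chars.find_nonneg_iff _ _).mpr hsep
        obtain ⟨k, hkdef⟩ : ∃ k : Nat, PySem.Chars.find cs pvSep = (k : Int) :=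
          ⟨_, (Int.toNat_of_nonneg hnn).symm⟩
        have hkle : k ≤ cs.length := by
          have h6 := PySem.Chars.find_le_length cs pvSep
          rw [hkdef] at h6
          omega
        rw [pvBchar, hkdef, if_neg (show ¬((k : Nat) : Int) = -1 by omega)]
        rw [if_pos ?hff]
        case hff =>
          rw [PySem.Chars.findFrom_natCast_eq_neg_one_iff _ _ _ hkle]
          intro hinf
          exact hnl (List.mem_of_mem_drop (hinf.subset (List.mem_singleton_self '\n')))
    · -- no separator anywhere: both return strip cs
      have hfind : PySem.Chars.find cs pvSep = -1 := by
        rw [PySem.Chars.find_eq_neg_one_iff]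
        exact hsep
      have hidx : (cs.splitOn '\n').findIdx? (fun l => PySem.Chars.isIn pvSep l) = none := by
        rw [List.findIdx?_eq_none_iff]
        intro l hl
        rw [Bool.eq_false_iff]
        intro hcontra
        exact hsep ((PySem.Chars.isIn_iff_infix pvSep l).mp hcontra |>.trans
          (pv_mem_splitOn_infix cs l hl))
      rw [pvAchar, hidx, pvBchar, if_pos hfind]

-- ===== VERDICT (by name: the statement is the Claim_ definition above) =====
theorem clean_transcript_content_py_spec : Claim_equal_clean_transcript_content_py := by
  intro content _
  unfold Spec_clean_transcript_content_py
  rw [pv_a_eq, pv_b_eq, pv_main content.toList.length content.toList le_rfl]
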